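-- pv_equiv track=rewrite | github.com/intensive-study/Study_202201 | Problem_Solving/week1/늑대와 올바른 단어(이진).py | check
-- ===== SOURCE A (Python) =====
-- def check(word):
--     cnt = 0
--     for i in word:
--         if i == 'w':
--             cnt += 1
--         else:
--             break
--     if word == ('w'*cnt+'o'*cnt+'l'*cnt+'f'*cnt):
--         return True
--     return False
-- ===== SOURCE B (Python) =====
-- def check(word):
--     n = len(word)
--     i = 0
--     while i < n and word[i] == 'w':
--         i += 1
--     c = i
--     for ch in 'olf':
--         k = 0
--         while i < n and word[i] == ch:
--             i += 1
--             k += 1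
--         if k != c:
--             return False
--     return i == n
-- ===== Notes on version B (the rewrite author's own statement) =====
-- stated objective: alternative
-- what changed: B validates w^n o^n l^n f^n by a single cursor scan counting each consecutive run and comparing run lengths, instead of counting leading w's and building the comparison string w*c+o*c+l*c+f*c.
import Mathlib
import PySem

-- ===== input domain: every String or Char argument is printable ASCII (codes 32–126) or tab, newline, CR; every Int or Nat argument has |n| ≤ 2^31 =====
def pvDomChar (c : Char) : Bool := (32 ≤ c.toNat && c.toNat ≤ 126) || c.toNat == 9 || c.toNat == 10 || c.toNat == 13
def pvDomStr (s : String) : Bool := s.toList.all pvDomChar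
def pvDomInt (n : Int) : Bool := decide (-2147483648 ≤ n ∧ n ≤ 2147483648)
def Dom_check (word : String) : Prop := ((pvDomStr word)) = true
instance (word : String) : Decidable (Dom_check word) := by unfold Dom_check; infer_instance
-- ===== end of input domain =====

-- B differs from A: a single cursor scan comparing consecutive run lengths, no comparison string built.

-- ===== PORT A =====
-- 'for i in word: if i == 'w': cnt += 1 else: break' — leading-'w' counter with break
def wcount : List Char → Nat
  | [] => 0
  | x :: xs => if x = 'w' then wcount xs + 1 else 0

-- 'word == 'w'*cnt+'o'*cnt+'l'*cnt+'f'*cnt' compared on the character lists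
def check (word : String) : Bool :=
  let cnt := wcount word.toList
  decide (word.toList = List.replicate cnt 'w' ++ List.replicate cnt 'o'
            ++ List.replicate cnt 'l' ++ List.replicate cnt 'f')

-- ===== PORT B =====
-- the inner 'while word[i] == ch' loop: run length and the remaining suffix
def runCount (c : Char) : List Char → Nat × List Char
  | [] => (0, [])
  | x :: xs => if x = c then ((runCount c xs).1 + 1, (runCount c xs).2) else (0, x :: xs)

-- the 'for ch in 'olf'' loop; final 'return i == n' is 'rest = []'
def altLoop (c : Nat) : List Char → List Char → Bool
  | [], rest => decide (rest = [])
  | ch :: chs, rest =>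
      let k := (runCount ch rest).1
      if k = c then altLoop c chs (runCount ch rest).2 else false

def check_alt (word : String) : Bool :=
  let p := runCount 'w' word.toList
  altLoop p.1 ['o', 'l', 'f'] p.2

-- ===== PRECONDITION & SPEC =====
def Spec_check (word : String) (out : Bool) : Prop := out = check_alt word
instance (word : String) (out : Bool) : Decidable (Spec_check word out) := by unfold Spec_check; infer_instance

-- ===== CLAIM (what is proved, stated in full; the proofs are below) =====
def Claim_equal_check : Prop := ∀ (word : String), Dom_check word → Spec_check word (check word)

-- ===== LEMMAS AND PROOFS =====

theorem runCount_fst_w (l : List Char) : (runCount 'w' l).1 = wcount l := by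
  induction l with
  | nil => rfl
  | cons x xs ih => simp [runCount, wcount]; split <;> simp [ih]

theorem runCount_decomp (ch : Char) (l : List Char) :
    l = List.replicate (runCount ch l).1 ch ++ (runCount ch l).2 := by
  induction l with
  | nil => rfl
  | cons x xs ih =>
    by_cases h : x = ch
    · simp [runCount, h, List.replicate_succ]
      exact (by simpa [h] using ih)
    · simp [runCount, h]

theorem runCount_replicate (ch : Char) (n : Nat) (r : List Char)
    (hr : r.head? ≠ some ch) : runCount ch (List.replicate n ch ++ r) = (n, r) := by
  induction n with
  | zero =>
    simp only [List.replicate, List.nil_append]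
    cases r with
    | nil => rfl
    | cons x xs =>
      have hx : x ≠ ch := by simpa [List.head?] using hr
      simp [runCount, hx]
  | succ n ih => simp [List.replicate_succ, runCount, ih]

theorem runCount_key (ch : Char) (r : List Char) (n : Nat) (s : List Char)
    (hs : s.head? ≠ some ch) :
    (r = List.replicate n ch ++ s) ↔ ((runCount ch r).1 = n ∧ (runCount ch r).2 = s) := by
  constructor
  · intro h
    subst h
    rw [runCount_replicate ch n s hs]
    exact ⟨rfl, rfl⟩
  · rintro ⟨h1, h2⟩
    have := runCount_decomp ch r
    rw [h1, h2] at this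
    exact this

theorem altLoop_cons (c : Nat) (ch : Char) (chs : List Char) (r : List Char) :
    (altLoop c (ch :: chs) r = true) ↔
      ((runCount ch r).1 = c ∧ altLoop c chs (runCount ch r).2 = true) := by
  simp only [altLoop]
  split_ifs with h <;> simp [h]

theorem check_eq_alt (word : String) : check word = check_alt word := by
  have hfst := runCount_fst_w word.toList
  unfold check check_alt
  set l := word.toList with hl
  set c := wcount l with hc
  have ho : (List.replicate c 'o' ++ (List.replicate c 'l' ++ List.replicate c 'f')).head? ≠ some 'w' := by
    cases c <;> simp [List.replicate_succ]
  have hlh : (List.replicate c 'l' ++ List.replicate c 'f').head? ≠ some 'o' := by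
    cases c <;> simp [List.replicate_succ]
  have hfh : (List.replicate c 'f').head? ≠ some 'l' := by
    cases c <;> simp [List.replicate_succ]
  have hnh : ([] : List Char).head? ≠ some 'f' := by simp
  have keyf : ∀ r : List Char, (r = List.replicate c 'f') ↔
      ((runCount 'f' r).1 = c ∧ (runCount 'f' r).2 = []) := by
    intro r; simpa using runCount_key 'f' r c [] hnh
  apply Bool.eq_iff_iff.mpr
  simp only [decide_eq_true_eq, altLoop_cons, List.append_assoc]
  rw [runCount_key 'w' l c _ ho]
  rw [runCount_key 'o' ((runCount 'w' l).2) c _ hlh]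
  rw [runCount_key 'l' _ c _ hfh]
  rw [keyf]
  simp [altLoop, hfst]

theorem check_spec : Claim_equal_check := by
  intro word _
  unfold Spec_check
  exact check_eq_alt word
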